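-- pv_equiv track=rewrite | github.com/StepheeGee/madlib-cli | help_from_JB/madlibclass.py | extract_parts_from_template
-- ===== SOURCE A (Python) =====
-- def extract_parts_from_template(template):
--     """
--     Extracts parts enclosed in curly braces from a template.
--
--     Parameters:
--     template (str): The template string.
--
--     Returns:
--     tuple: A tuple containing the stripped template and a tuple of parts.
--     """
--     parts = []
--     stripped = ""
--
--     capturing = False
--     capture = ""
--
--     for char in template:
--         if not capturing:
--             if char == "{":
--                 capturing = True
--                 capture = ""
--         else:
--             stripped += char
--             if char == "}":
--                 capturing = False
--                 parts.append(capture)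
--                 capture = ""
--             else:
--                 capture += char
--
--     return stripped, tuple(parts)
-- ===== SOURCE B (Python) =====
-- def extract_parts_from_template(template):
--     """
--     Extracts parts enclosed in curly braces from a template.
--
--     Index-jump parser: find each '{', then its matching '}', and slice,
--     instead of walking the string with a character state machine.
--     """
--     chunks = []
--     parts = []
--     rest = template
--     while True:
--         start = rest.find('{')
--         if start == -1:
--             break
--         rest = rest[start + 1:]
--         end = rest.find('}')
--         if end == -1:
--             chunks.append(rest)
--             break
--         chunks.append(rest[:end + 1])
--         parts.append(rest[:end])
--         rest = rest[end + 1:]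
--     return ''.join(chunks), tuple(parts)
-- ===== Notes on version B (the rewrite author's own statement) =====
-- stated objective: simpler
-- what changed: Replaced the per-character boolean state machine (capturing flag, growing capture/stripped strings) by an index-jump parser that finds each opening brace and its closing brace with str.find and slices the pieces out directly, joining chunks at the end.
import Mathlib
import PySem

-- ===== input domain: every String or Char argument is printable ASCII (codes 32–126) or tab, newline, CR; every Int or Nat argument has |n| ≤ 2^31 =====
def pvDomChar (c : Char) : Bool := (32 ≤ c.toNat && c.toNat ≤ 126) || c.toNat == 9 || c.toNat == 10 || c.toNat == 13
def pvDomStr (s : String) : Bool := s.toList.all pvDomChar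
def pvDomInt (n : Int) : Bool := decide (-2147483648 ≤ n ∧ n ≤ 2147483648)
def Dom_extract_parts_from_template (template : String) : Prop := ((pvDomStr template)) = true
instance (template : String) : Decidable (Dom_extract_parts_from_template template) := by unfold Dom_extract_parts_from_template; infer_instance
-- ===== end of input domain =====

-- B replaces A's per-character state machine by an index-jump parser (find '{', find '}', slice); objective: simpler.

-- ===== PORT A =====
-- state = (parts, stripped, capturing, capture); strings carried as char lists, wrapped at the end
def pvStepA (st : List String × List Char × Bool × List Char) (c : Char) :
    List String × List Char × Bool × List Char :=
  let (parts, stripped, capturing, capture) := st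
  if capturing = false then
    if c = '{' then (parts, stripped, true, []) else (parts, stripped, capturing, capture)
  else
    let stripped' := stripped ++ [c]
    if c = '}' then (parts ++ [String.mk capture], stripped', false, [])
    else (parts, stripped', capturing, capture ++ [c])

def extract_parts_from_template (template : String) : String × List String :=
  let st := template.toList.foldl pvStepA ([], [], false, [])
  (String.mk st.2.1, st.1)

-- ===== PORT B =====
-- hand port of str.find for a one-character needle (returns none where Python returns -1); exact on all inputs
def pvFindChar (t : Char) : List Char → Option Nat
  | [] => none
  | c :: r => if c = t then some 0 else (pvFindChar t r).map (· + 1)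

theorem pvFindChar_some_pos {t : Char} {l : List Char} {i : Nat}
    (h : pvFindChar t l = some i) : 0 < l.length := by
  cases l with
  | nil => simp [pvFindChar] at h
  | cons c r => simp

-- the while-loop of Source B: rest shrinks by at least the matched '{…}' each turn
def pvLoopB (rest : List Char) : List Char × List String :=
  match h : pvFindChar '{' rest with
  | none => ([], [])
  | some start =>
    let r := rest.drop (start + 1)
    match pvFindChar '}' r with
    | none => (r, [])
    | some e =>
      let p := pvLoopB (r.drop (e + 1))
      (r.take (e + 1) ++ p.1, String.mk (r.take e) :: p.2)
termination_by rest.length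
decreasing_by
  have := pvFindChar_some_pos h
  simp only [List.length_drop]
  omega

def extract_parts_from_template_alt (template : String) : String × List String :=
  let p := pvLoopB template.toList
  (String.mk p.1, p.2)

-- ===== PRECONDITION & SPEC =====
def Spec_extract_parts_from_template (template : String) (out : String × List String) : Prop := out = extract_parts_from_template_alt template
instance (template : String) (out : String × List String) : Decidable (Spec_extract_parts_from_template template out) := by unfold Spec_extract_parts_from_template; infer_instance

-- ===== CLAIM (what is proved, stated in full; the proofs are below) =====
def Claim_equal_extract_parts_from_template : Prop := ∀ (template : String), Dom_extract_parts_from_template template → Spec_extract_parts_from_template template (extract_parts_from_template template)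

-- ===== LEMMAS AND PROOFS =====

-- canonical recursive description of the scan: fScan = outside braces, gCap cap = inside, cap captured so far
mutual
def fScan : List Char → List Char × List String
  | [] => ([], [])
  | c :: r => if c = '{' then gCap [] r else fScan r
termination_by l => l.length

def gCap (cap : List Char) : List Char → List Char × List String
  | [] => ([], [])
  | c :: r =>
    if c = '}' then
      let p := fScan r
      ('}' :: p.1, String.mk cap :: p.2)
    else
      let p := gCap (cap ++ [c]) r
      (c :: p.1, p.2)
termination_by l => l.length
end

-- A's fold, started in either mode, computes fScan / gCap
theorem stepA_sim (l : List Char) :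
    (∀ ps s cap, (List.foldl pvStepA (ps, s, false, cap) l).1 = ps ++ (fScan l).2
      ∧ (List.foldl pvStepA (ps, s, false, cap) l).2.1 = s ++ (fScan l).1)
    ∧ (∀ ps s cap, (List.foldl pvStepA (ps, s, true, cap) l).1 = ps ++ (gCap cap l).2
      ∧ (List.foldl pvStepA (ps, s, true, cap) l).2.1 = s ++ (gCap cap l).1) := by
  induction l with
  | nil => simp [fScan, gCap]
  | cons c r ih =>
    constructor
    · intro ps s cap
      by_cases hc : c = '{'
      · simpa [hc, pvStepA, fScan] using ih.2 ps s []
      · simpa [hc, pvStepA, fScan] using ih.1 ps s cap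
    · intro ps s cap
      by_cases hc : c = '}'
      · have h := ih.1 (ps ++ [String.mk cap]) (s ++ [c]) []
        simp [hc, pvStepA, gCap, List.append_assoc] at h ⊢
        exact h
      · have h := ih.2 ps (s ++ [c]) (cap ++ [c])
        simp [hc, pvStepA, gCap, List.append_assoc] at h ⊢
        exact h

theorem fScan_eq_find (l : List Char) :
    fScan l = match pvFindChar '{' l with
      | none => ([], [])
      | some i => gCap [] (l.drop (i + 1)) := by
  induction l with
  | nil => simp [fScan, pvFindChar]
  | cons c r ih =>
    by_cases hc : c = '{'
    · simp [fScan, pvFindChar, hc]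
    · simp only [fScan, pvFindChar, hc, ite_false, ih]
      cases pvFindChar '{' r with
      | none => simp
      | some i => simp

theorem gCap_eq_find (r : List Char) : ∀ cap,
    gCap cap r = match pvFindChar '}' r with
      | none => (r, [])
      | some j =>
        (r.take (j + 1) ++ (fScan (r.drop (j + 1))).1,
         String.mk (cap ++ r.take j) :: (fScan (r.drop (j + 1))).2) := by
  induction r with
  | nil => intro cap; simp [gCap, pvFindChar]
  | cons c r ih =>
    intro cap
    by_cases hc : c = '}'
    · simp [gCap, pvFindChar, hc]
    · simp only [gCap, pvFindChar, hc, ite_false, ih (cap ++ [c])]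
      cases pvFindChar '}' r with
      | none => simp
      | some j => simp [List.append_assoc]

theorem loopB_eq_fScan (l : List Char) : pvLoopB l = fScan l := by
  rw [fScan_eq_find]
  unfold pvLoopB
  cases h : pvFindChar '{' l with
  | none => simp
  | some start =>
    simp only
    rw [gCap_eq_find]
    cases h2 : pvFindChar '}' (l.drop (start + 1)) with
    | none => simp
    | some e =>
      simp [loopB_eq_fScan (l.drop (start + 1 + (e + 1)))]
termination_by l.length
decreasing_by
  have := pvFindChar_some_pos h
  simp only [List.length_drop]
  omega

-- ===== VERDICT (by name: the statement is the Claim_ definition above) =====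
theorem extract_parts_from_template_spec : Claim_equal_extract_parts_from_template := by
  intro template _
  unfold Spec_extract_parts_from_template extract_parts_from_template extract_parts_from_template_alt
  have h := (stepA_sim template.toList).1 [] [] []
  rw [loopB_eq_fScan]
  simp only at h
  simp [h.1, h.2]
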